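-- pv_equiv track=rewrite | github.com/exo7math/python1-en-exo7 | strings/strings_4.py | format_full_name
-- ===== SOURCE A (Python) =====
-- def uppercase(sentence):
--     """ Transform a sentence to uppercase
--     Input: a sentence (a string)
--     Output: the same sentence in capital letters """
--
--     new_sentence = ""
--     for charac in sentence:
--         order = ord(charac)
--         if order >= 97 and order <= 122:
--              # transformation to uppercase
--             new_sentence = new_sentence + chr(order-32)
--         else:
--             # keep the character
--             new_sentence = new_sentence + charac
--
--     return new_sentence
--
-- def lowercase(sentence):
--     """ Transform a sentence to lowercase
--     Input: a sentence (a string)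
--     Output: the same sentence in lowercase """
--
--     new_sentence = ""
--     for charac in sentence:
--         order = ord(charac)
--         if order >= 65 and order <= 90:
--              # transformation to lowercase
--             new_sentence = new_sentence + chr(order+32)
--         else:
--             # keep the character
--             new_sentence = new_sentence + charac
--
--     return new_sentence
--
-- def format_full_name(somebody):
--     """ Transform some name to the style "First LAST"
--     Input: the first ans last name of someone (separated by a space)
--     Output: the formated full name "First LAST" """
--
--     # We split first and last name
--     first = ""
--     last = ""
--     in_first = True     # We are in the first name
--     for charac in somebody:
--         if in_first:
--             first = first + charac
--         else:
--             last = last + charac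
--         if charac == " ":
--             in_first =  False    # End of teh first name
--
--     # Format of the first name
--     new_first = uppercase(first[0])+lowercase(first[1:len(first)])
--
--     # Format of last name
--     new_last = uppercase(last)
--
--     return new_first+new_last
-- ===== SOURCE B (Python) =====
-- def format_full_name(somebody):
--     """Transform some name to the style "First LAST" in a single pass."""
--
--     def up(c):
--         return chr(ord(c) - 32) if 'a' <= c <= 'z' else c
--
--     def lo(c):
--         return chr(ord(c) + 32) if 'A' <= c <= 'Z' else c
--
--     out = [up(somebody[0])]
--     in_first = somebody[0] != ' '
--     for c in somebody[1:]:
--         if in_first: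
--             out.append(lo(c))
--             if c == ' ':
--                 in_first = False
--         else:
--             out.append(up(c))
--     return ''.join(out)
-- ===== Notes on version B (the rewrite author's own statement) =====
-- stated objective: simpler
-- what changed: B replaces A's split pass plus three separate case-transform passes (and intermediate first/last strings) with a single left-to-right pass that emits each output character directly, tracking only an in_first flag.
import Mathlib
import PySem

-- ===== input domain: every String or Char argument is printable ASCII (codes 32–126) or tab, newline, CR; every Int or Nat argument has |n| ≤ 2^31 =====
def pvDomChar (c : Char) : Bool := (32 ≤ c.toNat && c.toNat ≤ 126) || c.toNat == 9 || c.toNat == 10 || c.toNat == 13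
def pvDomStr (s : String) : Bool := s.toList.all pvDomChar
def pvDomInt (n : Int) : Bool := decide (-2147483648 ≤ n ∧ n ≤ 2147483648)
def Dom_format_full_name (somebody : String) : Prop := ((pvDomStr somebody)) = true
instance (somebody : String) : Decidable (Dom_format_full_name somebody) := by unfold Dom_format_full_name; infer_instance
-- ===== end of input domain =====

-- B replaces A's split pass plus three case-transform passes with a single left-to-right pass emitting output characters directly (objective: simpler).

-- ===== PORT A =====
-- helper uppercase(sentence): character-by-character rebuild, as in A
def pvUppercase (sentence : List Char) : List Char :=
  sentence.foldl (fun acc c =>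
    if 97 ≤ c.toNat ∧ c.toNat ≤ 122 then acc ++ [Char.ofNat (c.toNat - 32)] else acc ++ [c]) []

-- helper lowercase(sentence)
def pvLowercase (sentence : List Char) : List Char :=
  sentence.foldl (fun acc c =>
    if 65 ≤ c.toNat ∧ c.toNat ≤ 90 then acc ++ [Char.ofNat (c.toNat + 32)] else acc ++ [c]) []

-- body of A's split loop: append charac to first or last, then update in_first
def pvStepA (p : List Char × List Char × Bool) (c : Char) : List Char × List Char × Bool :=
  let p1 := if p.2.2 then (p.1 ++ [c], p.2.1) else (p.1, p.2.1 ++ [c])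
  (p1.1, p1.2, if c = ' ' then false else p.2.2)

def format_full_name (somebody : String) : String :=
  let st := somebody.toList.foldl pvStepA ([], [], true)
  match st.1 with
  | [] => ""  -- first[0] raises IndexError in Python here (only when somebody = ""); excluded by Pre_
  | c :: rest => String.ofList (pvUppercase [c] ++ pvLowercase rest ++ pvUppercase st.2.1)

-- ===== PORT B =====
-- up(c) / lo(c): 'a' <= c <= 'z' etc. are ord comparisons in Python; stated on c.toNat here, exact on all inputs
def pvUp (c : Char) : Char := if 97 ≤ c.toNat ∧ c.toNat ≤ 122 then Char.ofNat (c.toNat - 32) else c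
def pvLo (c : Char) : Char := if 65 ≤ c.toNat ∧ c.toNat ≤ 90 then Char.ofNat (c.toNat + 32) else c

-- body of B's single loop over somebody[1:]
def pvStepB (p : List Char × Bool) (c : Char) : List Char × Bool :=
  if p.2 then (p.1 ++ [pvLo c], decide (c ≠ ' ')) else (p.1 ++ [pvUp c], false)

def format_full_name_alt (somebody : String) : String :=
  match somebody.toList with
  | [] => ""  -- somebody[0] raises IndexError in Python here; excluded by Pre_
  | c :: rest => String.ofList (rest.foldl pvStepB ([pvUp c], decide (c ≠ ' '))).1

-- ===== PRECONDITION & SPEC =====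
-- Pre_ excludes only the empty string, on which A (and B) raise IndexError.
def Pre_format_full_name (somebody : String) : Prop := somebody ≠ ""
instance (somebody : String) : Decidable (Pre_format_full_name somebody) := by
  unfold Pre_format_full_name; infer_instance
def pvWitness_format_full_name : String := "John smith"

def Spec_format_full_name (somebody : String) (out : String) : Prop := out = format_full_name_alt somebody
instance (somebody : String) (out : String) : Decidable (Spec_format_full_name somebody out) := by unfold Spec_format_full_name; infer_instance

-- ===== CLAIM (what is proved, stated in full; the proofs are below) =====
def Claim_equal_format_full_name : Prop := ∀ (somebody : String), Dom_format_full_name somebody → Pre_format_full_name somebody → Spec_format_full_name somebody (format_full_name somebody)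

-- ===== LEMMAS AND PROOFS =====

-- "first name" segment of A's split: up to and including the first space
def pvTakeIncl : List Char → List Char
  | [] => []
  | c :: t => if c = ' ' then [c] else c :: pvTakeIncl t

-- "last name" segment: everything after the first space
def pvDropIncl : List Char → List Char
  | [] => []
  | c :: t => if c = ' ' then t else pvDropIncl t

theorem pvUppercase_eq_map (s : List Char) : pvUppercase s = s.map pvUp := by
  suffices h : ∀ acc, s.foldl (fun acc c =>
      if 97 ≤ c.toNat ∧ c.toNat ≤ 122 then acc ++ [Char.ofNat (c.toNat - 32)] else acc ++ [c]) acc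
      = acc ++ s.map pvUp by simpa using h []
  induction s with
  | nil => simp
  | cons c t ih =>
    intro acc
    simp only [List.foldl_cons, List.map_cons, ih, pvUp]
    split_ifs <;> simp

theorem pvLowercase_eq_map (s : List Char) : pvLowercase s = s.map pvLo := by
  suffices h : ∀ acc, s.foldl (fun acc c =>
      if 65 ≤ c.toNat ∧ c.toNat ≤ 90 then acc ++ [Char.ofNat (c.toNat + 32)] else acc ++ [c]) acc
      = acc ++ s.map pvLo by simpa using h []
  induction s with
  | nil => simp
  | cons c t ih =>
    intro acc
    simp only [List.foldl_cons, List.map_cons, ih, pvLo]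
    split_ifs <;> simp

-- closed forms of A's split fold
theorem pvAfold_false (s : List Char) : ∀ f l,
    s.foldl pvStepA (f, l, false) = (f, l ++ s, false) := by
  induction s with
  | nil => simp
  | cons c t ih =>
    intro f l
    have hstep : pvStepA (f, l, false) c = (f, l ++ [c], false) := by simp [pvStepA]
    rw [List.foldl_cons, hstep, ih]
    simp

theorem pvAfold_true (s : List Char) : ∀ f l,
    s.foldl pvStepA (f, l, true)
    = (f ++ pvTakeIncl s, l ++ pvDropIncl s, !s.any (· = ' ')) := by
  induction s with
  | nil => simp [pvTakeIncl, pvDropIncl]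
  | cons c t ih =>
    intro f l
    by_cases hc : c = ' '
    · have hstep : pvStepA (f, l, true) c = (f ++ [c], l, false) := by simp [pvStepA, hc]
      rw [List.foldl_cons, hstep, pvAfold_false]
      simp [hc, pvTakeIncl, pvDropIncl]
    · have hstep : pvStepA (f, l, true) c = (f ++ [c], l, true) := by simp [pvStepA, hc]
      rw [List.foldl_cons, hstep, ih]
      simp [hc, pvTakeIncl, pvDropIncl]

-- closed forms of B's fold
theorem pvBfold_false (s : List Char) : ∀ acc,
    s.foldl pvStepB (acc, false) = (acc ++ s.map pvUp, false) := by
  induction s with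
  | nil => simp
  | cons c t ih =>
    intro acc
    have hstep : pvStepB (acc, false) c = (acc ++ [pvUp c], false) := by simp [pvStepB]
    rw [List.foldl_cons, hstep, ih]
    simp

theorem pvBfold_true (s : List Char) : ∀ acc,
    s.foldl pvStepB (acc, true)
    = (acc ++ (pvTakeIncl s).map pvLo ++ (pvDropIncl s).map pvUp, !s.any (· = ' ')) := by
  induction s with
  | nil => simp [pvTakeIncl, pvDropIncl]
  | cons c t ih =>
    intro acc
    by_cases hc : c = ' '
    · have hstep : pvStepB (acc, true) c = (acc ++ [pvLo c], false) := by simp [pvStepB, hc]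
      rw [List.foldl_cons, hstep, pvBfold_false]
      simp [hc, pvTakeIncl, pvDropIncl, pvLo]
    · have hstep : pvStepB (acc, true) c = (acc ++ [pvLo c], true) := by simp [pvStepB, hc]
      rw [List.foldl_cons, hstep, ih]
      simp [hc, pvTakeIncl, pvDropIncl]

-- ===== VERDICT (by name: the statement is the Claim_ definition above) =====
theorem format_full_name_spec : Claim_equal_format_full_name := by
  intro somebody _ hpre
  unfold Spec_format_full_name format_full_name format_full_name_alt
  have hs : somebody.toList ≠ [] := by
    simpa [String.toList_eq_nil_iff] using hpre
  cases htl : somebody.toList with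
  | nil => exact absurd htl hs
  | cons c rest =>
    simp only [pvAfold_true]
    by_cases hc : c = ' '
    · simp [hc, pvTakeIncl, pvDropIncl, pvBfold_false,
        pvUppercase_eq_map, pvLowercase_eq_map, pvUp]
    · simp [hc, pvTakeIncl, pvDropIncl, pvBfold_true,
        pvUppercase_eq_map, pvLowercase_eq_map]
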